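-- pv_equiv track=rewrite | github.com/martinwk/chord_importer_tool | songselect/parse_onsong_export.py | add_closing_tags
-- ===== SOURCE A (Python) =====
-- from typing import List, Tuple, Dict
--
-- def add_closing_tags(content: List[str]) -> List[str]:
--     """Add appropriate closing tags for sections and clean up whitespace."""
--     result = []
--     open_sections = []
--
--     for line in content:
--         stripped = line.strip()
--
--         # Skip empty lines temporarily - we'll handle them in cleanup
--         if not stripped:
--             result.append('')
--             continue
--
--         # Check if this line starts a new section
--         if stripped.startswith('{start_of_'):
--             # Close any open sections first
--             while open_sections:
--                 section_type = open_sections.pop()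
--                 result.append(f'{{end_of_{section_type}}}')
--
--             # Add the new section
--             result.append(stripped)
--
--             # Extract section type
--             if 'chorus' in stripped:
--                 open_sections.append('chorus')
--             elif 'verse' in stripped:
--                 open_sections.append('verse')
--             elif 'bridge' in stripped:
--                 open_sections.append('bridge')
--             elif 'tab' in stripped:
--                 open_sections.append('tab')
--
--         else:
--             result.append(line.rstrip())  # Remove trailing whitespace
--
--     # Close any remaining open sections
--     while open_sections:
--         section_type = open_sections.pop()
--         result.append(f'{{end_of_{section_type}}}')
--
--     return result
-- ===== SOURCE B (Python) =====
-- def add_closing_tags(content):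
--     """Add appropriate closing tags for sections and clean up whitespace."""
--     SECTIONS = ('chorus', 'verse', 'bridge', 'tab')
--
--     def clean(line):
--         return '' if not line.strip() else line.rstrip()
--
--     def is_start(line):
--         return line.strip().startswith('{start_of_')
--
--     def close_tag(start_line):
--         # closing tag for the first section name mentioned in the start tag (or none)
--         return ['{end_of_%s}' % n for n in SECTIONS if n in start_line][:1]
--
--     def split_at_start(lines):
--         # (cleaned copy of the lines before the first start line, remainder from it on)
--         for k, l in enumerate(lines):
--             if is_start(l):
--                 return [clean(x) for x in lines[:k]], lines[k:]
--         return [clean(x) for x in lines], []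
--
--     def render(lines):
--         head, rest = split_at_start(lines)
--         if not rest:
--             return head
--         start, body = rest[0].strip(), rest[1:]
--         mid, after = split_at_start(body)
--         return head + [start] + mid + close_tag(start) + render(after)
--
--     return render(content)
-- ===== Notes on version B (the rewrite author's own statement) =====
-- stated objective: alternative
-- what changed: Replaces A's single-pass fold that threads a stack of open sections with a recursive segment decomposition: split the input at each '{start_of_' line, render each segment (cleaned head, start tag, cleaned body, one closing tag computed from the start line) and recurse on the rest; the closing-tag position falls out of the segment boundary instead of being tracked state.
import Mathlib
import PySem

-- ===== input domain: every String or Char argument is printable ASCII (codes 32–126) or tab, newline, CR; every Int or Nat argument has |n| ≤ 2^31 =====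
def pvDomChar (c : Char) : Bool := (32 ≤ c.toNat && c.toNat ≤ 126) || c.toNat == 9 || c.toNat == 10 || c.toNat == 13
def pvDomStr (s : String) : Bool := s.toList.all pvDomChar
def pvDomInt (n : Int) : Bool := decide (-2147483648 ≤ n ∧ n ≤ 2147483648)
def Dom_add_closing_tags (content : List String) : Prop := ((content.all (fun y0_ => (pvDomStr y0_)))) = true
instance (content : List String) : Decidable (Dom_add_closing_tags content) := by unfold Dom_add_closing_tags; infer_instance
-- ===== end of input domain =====

-- B replaces A's single-pass fold carrying a stack of open sections by a recursive
-- segment decomposition (split at each start tag, render segment by segment): alternative structure, same O(n) cost.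

-- ===== PORT A =====
-- 'while open_sections: section_type = open_sections.pop(); result.append(...)'
-- (the stack is kept top-first, so pop() is the head)
def pvCloseOpen : List String → List String → List String
  | [], result => result
  | sec :: rest, result => pvCloseOpen rest (result ++ ["{end_of_" ++ sec ++ "}"])

def pvStepA (st : List String × List String) (line : String) : List String × List String :=
  let result := st.1
  let openSections := st.2
  let stripped := PySem.Str.strip line
  if stripped == "" then (result ++ [""], openSections)
  else if PySem.Str.startswith stripped "{start_of_" then
    let result := pvCloseOpen openSections result
    let openSections : List String := []
    let result := result ++ [stripped]
    let openSections :=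
      if PySem.Str.isIn "chorus" stripped then "chorus" :: openSections
      else if PySem.Str.isIn "verse" stripped then "verse" :: openSections
      else if PySem.Str.isIn "bridge" stripped then "bridge" :: openSections
      else if PySem.Str.isIn "tab" stripped then "tab" :: openSections
      else openSections
    (result, openSections)
  else (result ++ [PySem.Str.rstrip line], openSections)

def add_closing_tags (content : List String) : List String :=
  let st := content.foldl pvStepA ([], [])
  pvCloseOpen st.2 st.1

-- ===== PORT B =====
-- clean(line)
def pvClean (line : String) : String :=
  if PySem.Str.strip line == "" then "" else PySem.Str.rstrip line

-- is_start(line)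
def pvIsStart (line : String) : Bool :=
  PySem.Str.startswith (PySem.Str.strip line) "{start_of_"

-- close_tag(start_line): list comprehension over SECTIONS, then [:1]
def pvCloseTag (start_line : String) : List String :=
  ((["chorus", "verse", "bridge", "tab"].filter
      (fun n => PySem.Str.isIn n start_line)).map
      (fun n => "{end_of_" ++ n ++ "}")).take 1

-- split_at_start(lines): scan for the first start line
def pvSplitAtStart : List String → List String × List String
  | [] => ([], [])
  | l :: ls =>
    if pvIsStart l then ([], l :: ls)
    else
      let p := pvSplitAtStart ls
      (pvClean l :: p.1, p.2)

theorem pvSplit_snd_len : ∀ (ls : List String), (pvSplitAtStart ls).2.length ≤ ls.length := by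
  intro ls
  induction ls with
  | nil => simp [pvSplitAtStart]
  | cons l ls ih =>
    simp only [pvSplitAtStart]
    split
    · simp
    · simpa using Nat.le_succ_of_le ih

-- render(lines)
def pvRender (lines : List String) : List String :=
  let p := pvSplitAtStart lines
  match h : p.2 with
  | [] => p.1
  | s :: body =>
    let start := PySem.Str.strip s
    let q := pvSplitAtStart body
    p.1 ++ [start] ++ q.1 ++ pvCloseTag start ++ pvRender q.2
termination_by lines.length
decreasing_by
  have h1 : (pvSplitAtStart lines).2.length ≤ lines.length := pvSplit_snd_len lines
  have h2 : (pvSplitAtStart body).2.length ≤ body.length := pvSplit_snd_len body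
  rw [h] at h1
  simp at h1
  omega

def add_closing_tags_alt (content : List String) : List String :=
  pvRender content

-- ===== PRECONDITION & SPEC =====
def Spec_add_closing_tags (content : List String) (out : List String) : Prop := out = add_closing_tags_alt content
instance (content : List String) (out : List String) : Decidable (Spec_add_closing_tags content out) := by unfold Spec_add_closing_tags; infer_instance

-- ===== CLAIM (what is proved, stated in full; the proofs are below) =====
def Claim_equal_add_closing_tags : Prop := ∀ (content : List String), Dom_add_closing_tags content → Spec_add_closing_tags content (add_closing_tags content)

-- ===== LEMMAS AND PROOFS =====

-- the stack A pushes at a start line with stripped text s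
def pvNewStack (s : String) : List String :=
  if PySem.Str.isIn "chorus" s then ["chorus"]
  else if PySem.Str.isIn "verse" s then ["verse"]
  else if PySem.Str.isIn "bridge" s then ["bridge"]
  else if PySem.Str.isIn "tab" s then ["tab"]
  else []

-- reference semantics: what A appends after state stack on the remaining lines
def pvOut : List String → List String → List String
  | [], stack => pvCloseOpen stack []
  | l :: ls, stack =>
    let s := PySem.Str.strip l
    if s == "" then "" :: pvOut ls stack
    else if PySem.Str.startswith s "{start_of_" then
      pvCloseOpen stack [] ++ s :: pvOut ls (pvNewStack s)
    else PySem.Str.rstrip l :: pvOut ls stack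

theorem pvCloseOpen_append : ∀ (stack res : List String),
    pvCloseOpen stack res = res ++ pvCloseOpen stack [] := by
  intro stack
  induction stack with
  | nil => simp [pvCloseOpen]
  | cons sec rest ih =>
    intro res
    simp only [pvCloseOpen]
    rw [ih (res ++ _), ih ([] ++ _)]
    simp

-- A's run from any state equals res ++ pvOut lines stack
theorem pvA_run : ∀ (lines res stack : List String),
    pvCloseOpen (lines.foldl pvStepA (res, stack)).2 (lines.foldl pvStepA (res, stack)).1
      = res ++ pvOut lines stack := by
  intro lines
  induction lines with
  | nil =>
    intro res stack
    simp only [List.foldl_nil, pvOut]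
    exact pvCloseOpen_append stack res
  | cons l ls ih =>
    intro res stack
    rw [List.foldl_cons]
    by_cases h1 : PySem.Str.strip l == ""
    · have hs : pvStepA (res, stack) l = (res ++ [""], stack) := by
        simp [pvStepA, h1]
      have ho : pvOut (l :: ls) stack = "" :: pvOut ls stack := by
        simp [pvOut, h1]
      rw [hs, ih, ho]; simp
    · by_cases h2 : PySem.Str.startswith (PySem.Str.strip l) "{start_of_"
      · have h2c := h2; simp at h2c
        have hs : pvStepA (res, stack) l =
            (pvCloseOpen stack res ++ [PySem.Str.strip l], pvNewStack (PySem.Str.strip l)) := by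
          simp only [pvStepA, pvNewStack]
          simp [h1, h2c]
        have ho : pvOut (l :: ls) stack =
            pvCloseOpen stack [] ++ PySem.Str.strip l :: pvOut ls (pvNewStack (PySem.Str.strip l)) := by
          simp [pvOut, h1, h2c]
        rw [hs, ih, ho, pvCloseOpen_append stack res]
        simp
      · have h2c := h2; simp at h2c
        have hs : pvStepA (res, stack) l = (res ++ [PySem.Str.rstrip l], stack) := by
          simp [pvStepA, h1, h2c]
        have ho : pvOut (l :: ls) stack = PySem.Str.rstrip l :: pvOut ls stack := by
          simp [pvOut, h1, h2c]
        rw [hs, ih, ho]; simp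

-- the remainder produced by pvSplitAtStart is empty or headed by a start line
theorem pvSplit_head : ∀ (ls : List String) (s : String) (b : List String),
    (pvSplitAtStart ls).2 = s :: b → pvIsStart s = true := by
  intro ls
  induction ls with
  | nil => intro s b h; simp [pvSplitAtStart] at h
  | cons l ls ih =>
    intro s b h
    simp only [pvSplitAtStart] at h
    split at h
    · simp at h
      cases h.1
      assumption
    · exact ih s b (by simpa using h)

-- blank lines are never start lines
theorem pvIsStart_of_blank (l : String) (h : (PySem.Str.strip l == "") = true) :
    pvIsStart l = false := by
  unfold pvIsStart
  rw [eq_of_beq h]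
  decide

theorem pvCloseTag_eq (s : String) : pvCloseTag s = pvCloseOpen (pvNewStack s) [] := by
  unfold pvCloseTag pvNewStack
  split_ifs with h1 h2 h3 h4 <;> simp_all [List.filter, pvCloseOpen]

-- pvOut split along the first start line
theorem pvOut_split : ∀ (lines stack : List String),
    pvOut lines stack =
      (pvSplitAtStart lines).1 ++
        (match (pvSplitAtStart lines).2 with
          | [] => pvCloseOpen stack []
          | s :: body =>
            pvCloseOpen stack [] ++ PySem.Str.strip s :: pvOut body (pvNewStack (PySem.Str.strip s))) := by
  intro lines
  induction lines with
  | nil => intro stack; simp [pvSplitAtStart, pvOut]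
  | cons l ls ih =>
    intro stack
    by_cases hstart : pvIsStart l
    · have h1 : ¬ (PySem.Str.strip l == "") = true := by
        intro hb
        rw [pvIsStart_of_blank l hb] at hstart
        exact Bool.false_ne_true hstart
      have hstart' : PySem.Str.startswith (PySem.Str.strip l) "{start_of_" = true := hstart
      have hsc := hstart'; simp at hsc
      have hsplit : pvSplitAtStart (l :: ls) = ([], l :: ls) := by
        simp [pvSplitAtStart, hstart]
      have ho : pvOut (l :: ls) stack =
          pvCloseOpen stack [] ++ PySem.Str.strip l :: pvOut ls (pvNewStack (PySem.Str.strip l)) := by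
        simp [pvOut, h1, hsc]
      rw [ho, hsplit]
      simp
    · have hsplit : pvSplitAtStart (l :: ls) =
          (pvClean l :: (pvSplitAtStart ls).1, (pvSplitAtStart ls).2) := by
        simp [pvSplitAtStart, hstart]
      by_cases h1 : PySem.Str.strip l == ""
      · have ho : pvOut (l :: ls) stack = "" :: pvOut ls stack := by
          simp [pvOut, h1]
        have hc : pvClean l = "" := by simp [pvClean, h1]
        rw [ho, hsplit, hc, ih stack]
        simp
      · have hstart' : PySem.Str.startswith (PySem.Str.strip l) "{start_of_" = false := by
          simpa [pvIsStart] using hstart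
        have hsc := hstart'; simp at hsc
        have ho : pvOut (l :: ls) stack = PySem.Str.rstrip l :: pvOut ls stack := by
          simp [pvOut, h1, hsc]
        have hc : pvClean l = PySem.Str.rstrip l := by simp [pvClean, h1]
        rw [ho, hsplit, hc, ih stack]
        simp

-- non-dependent unfolding of pvRender
theorem pvRender_unfold (lines : List String) :
    pvRender lines =
      (pvSplitAtStart lines).1 ++
        (match (pvSplitAtStart lines).2 with
          | [] => []
          | s :: body =>
            [PySem.Str.strip s] ++ (pvSplitAtStart body).1 ++
              pvCloseTag (PySem.Str.strip s) ++ pvRender (pvSplitAtStart body).2) := by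
  rw [pvRender]
  split <;> rename_i h <;> simp [h]

-- B's render equals A's reference semantics from the empty stack
theorem pvRender_eq_out : ∀ (n : ℕ) (lines : List String), lines.length ≤ n →
    pvRender lines = pvOut lines [] := by
  intro n
  induction n with
  | zero =>
    intro lines h
    have hnil : lines = [] := List.eq_nil_of_length_eq_zero (Nat.le_zero.mp h)
    subst hnil
    rw [pvRender_unfold]
    simp [pvSplitAtStart, pvOut, pvCloseOpen]
  | succ n ih =>
    intro lines hlen
    rw [pvRender_unfold, pvOut_split lines []]
    cases hsnd : (pvSplitAtStart lines).2 with
    | nil => simp [pvCloseOpen]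
    | cons s body =>
      have hlen1 : (pvSplitAtStart lines).2.length ≤ lines.length := pvSplit_snd_len lines
      rw [hsnd] at hlen1
      simp only [List.length_cons] at hlen1
      dsimp only
      rw [pvOut_split body (pvNewStack (PySem.Str.strip s))]
      cases hq : (pvSplitAtStart body).2 with
      | nil =>
        have hr : pvRender ([] : List String) = [] := by
          rw [pvRender_unfold]; simp [pvSplitAtStart]
        simp [hr, pvCloseTag_eq, pvCloseOpen]
      | cons s' body' =>
        have hstart' : pvIsStart s' = true := pvSplit_head body s' body' hq
        have hlen2 : (pvSplitAtStart body).2.length ≤ body.length := pvSplit_snd_len body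
        rw [hq] at hlen2
        have ihq : pvRender (s' :: body') = pvOut (s' :: body') [] := by
          apply ih
          simp only [List.length_cons] at hlen2 ⊢
          omega
        have hsp : pvSplitAtStart (s' :: body') = ([], s' :: body') := by
          simp [pvSplitAtStart, hstart']
        rw [ihq, pvOut_split (s' :: body') [], hsp]
        simp [pvCloseTag_eq, pvCloseOpen]

-- ===== VERDICT (by name: the statement is the Claim_ definition above) =====
theorem add_closing_tags_spec : Claim_equal_add_closing_tags := by
  intro content _
  unfold Spec_add_closing_tags add_closing_tags add_closing_tags_alt
  have hA := pvA_run content [] []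
  simp only [List.nil_append] at hA
  rw [hA, pvRender_eq_out content.length content (le_refl _)]
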